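-- pv_equiv track=rewrite | github.com/Jbrocket/reddit | reddit_classes.py | formatprint
-- ===== SOURCE A (Python) =====
-- def formatprint(item, depth):
--     total = 0
--     spaces = "&nbsp"*4
--     add = 50
--     string = ""
--
--     while total + add < len(item):
--         try:
--             while item[total + add] != ' ':
--                 add += 1
--         except IndexError:
--             break
--         string += f"{depth*spaces}{item[total:total+add]}<br>"
--         total += add
--         add = 50
--     return string + f"{depth*spaces}{item[total:]}<br>"
-- ===== SOURCE B (Python) =====
-- def formatprint(item, depth):
--     pref = depth * ("&nbsp" * 4)
--     out = []
--     start = 0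
--     for i, c in enumerate(item):
--         if c == ' ' and i >= start + 50:
--             out.append(f"{pref}{item[start:i]}<br>")
--             start = i
--     return "".join(out) + f"{pref}{item[start:]}<br>"
-- ===== Notes on version B (the rewrite author's own statement) =====
-- stated objective: simpler
-- what changed: Replaces the nested while loops with try/except IndexError and string concatenation by a single enumerate pass that appends a wrapped chunk whenever a space at least 50 chars past the current line start is seen, joining the parts at the end.
import Mathlib
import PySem

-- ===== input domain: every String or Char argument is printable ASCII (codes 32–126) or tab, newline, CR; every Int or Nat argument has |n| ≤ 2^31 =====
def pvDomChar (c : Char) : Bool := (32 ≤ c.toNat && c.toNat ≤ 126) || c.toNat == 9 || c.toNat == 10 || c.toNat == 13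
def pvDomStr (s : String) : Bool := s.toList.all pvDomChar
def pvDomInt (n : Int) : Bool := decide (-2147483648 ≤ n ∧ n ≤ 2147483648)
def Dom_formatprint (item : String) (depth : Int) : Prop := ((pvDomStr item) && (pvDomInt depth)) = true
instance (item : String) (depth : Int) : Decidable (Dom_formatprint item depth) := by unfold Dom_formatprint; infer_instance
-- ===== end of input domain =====

-- B replaces A's nested while loops with try/except IndexError and repeated string
-- concatenation by a single enumerate pass that cuts a line at each space ≥ 50
-- characters past the current line start; objective: simpler.

-- ===== PORT A =====

-- A's inner 'while item[total+add] != " ": add += 1' with its try/except IndexError: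
-- returns the first index j' ≥ j with cs[j'] = ' ', or none when the scan runs past
-- the end (the bound check 'j < cs.length' is exactly where item[j] would raise).
-- 'fuel' only makes the recursion structural; callers pass cs.length, enough to
-- reach the end of the string from any start, so it never cuts the scan short.
def fpScanA (cs : List Char) : Nat → Nat → Option Nat
  | 0, _ => none
  | fuel + 1, j =>
    if h : j < cs.length then
      if cs[j] = ' ' then some j else fpScanA cs fuel (j + 1)
    else none

-- A's outer while loop; 'string' is the accumulator, 'pre' = depth*spaces,
-- item[total:total+add] = (cs.drop total).take (p - total) where p = total + add.
-- 'fuel' (callers pass cs.length, enough since total advances by ≥ 50 each turn)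
-- only makes the recursion structural.
def fpLoopA (cs pre : List Char) : Nat → Nat → List Char → List Char
  | 0, total, string => string ++ pre ++ cs.drop total ++ "<br>".toList
  | fuel + 1, total, string =>
    if total + 50 < cs.length then
      match fpScanA cs cs.length (total + 50) with
      | none => string ++ pre ++ cs.drop total ++ "<br>".toList
      | some p =>
          fpLoopA cs pre fuel p
            (string ++ pre ++ (cs.drop total).take (p - total) ++ "<br>".toList)
    else string ++ pre ++ cs.drop total ++ "<br>".toList

def formatprint (item : String) (depth : Int) : String :=
  -- spaces = "&nbsp"*4; f-strings prepend depth*spaces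
  let pre := PySem.List.pyRepeat (PySem.List.pyRepeat "&nbsp".toList 4) depth
  String.ofList (fpLoopA item.toList pre item.toList.length 0 [])

-- ===== PORT B =====

-- B's single 'for i, c in enumerate(item)' loop; state = (out, start).
def formatprint_alt (item : String) (depth : Int) : String :=
  let cs := item.toList
  let pre := PySem.List.pyRepeat (PySem.List.pyRepeat "&nbsp".toList 4) depth
  let st :=
    (PySem.List.enumerate cs 0).foldl
      (fun (acc : List (List Char) × Int) ic =>
        if ic.2 = ' ' ∧ acc.2 + 50 ≤ ic.1 then
          (acc.1 ++ [pre ++ (cs.drop acc.2.toNat).take (ic.1 - acc.2).toNat ++ "<br>".toList], ic.1)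
        else acc)
      ([], 0)
  String.ofList (st.1.flatten ++ (pre ++ cs.drop st.2.toNat ++ "<br>".toList))

-- ===== PRECONDITION & SPEC =====
def Spec_formatprint (item : String) (depth : Int) (out : String) : Prop := out = formatprint_alt item depth
instance (item : String) (depth : Int) (out : String) : Decidable (Spec_formatprint item depth out) := by unfold Spec_formatprint; infer_instance

-- ===== CLAIM (what is proved, stated in full; the proofs are below) =====
def Claim_equal_formatprint : Prop := ∀ (item : String) (depth : Int), Dom_formatprint item depth → Spec_formatprint item depth (formatprint item depth)

-- ===== LEMMAS AND PROOFS =====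

-- reference shape: the concatenation of wrapped chunks produced from line start 'total'
def fpChunksB (cs pre : List Char) : Nat → Nat → List Char
  | 0, total => pre ++ cs.drop total ++ "<br>".toList
  | fuel + 1, total =>
    match fpScanA cs cs.length (total + 50) with
    | none => pre ++ cs.drop total ++ "<br>".toList
    | some p =>
        (pre ++ (cs.drop total).take (p - total) ++ "<br>".toList) ++ fpChunksB cs pre fuel p

theorem fpScanA_eq_none (cs : List Char) :
    ∀ (f a : Nat), (∀ j, a ≤ j → (hj : j < cs.length) → cs[j] ≠ ' ') →
    fpScanA cs f a = none := by
  intro f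
  induction f with
  | zero => intro a _; rfl
  | succ f ih =>
    intro a h
    rw [fpScanA]
    by_cases ha : a < cs.length
    · rw [dif_pos ha, if_neg (h a le_rfl ha)]
      exact ih (a + 1) (fun j hj hlt => h j (by omega) hlt)
    · rw [dif_neg ha]

theorem fpScanA_eq_some (cs : List Char) :
    ∀ (f a k : Nat), k < a + f → a ≤ k → (hk : k < cs.length) → cs[k] = ' ' →
    (∀ j, a ≤ j → j < k → (hj : j < cs.length) → cs[j] ≠ ' ') →
    fpScanA cs f a = some k := by
  intro f
  induction f with
  | zero => intro a k hf ha _ _ _; omega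
  | succ f ih =>
    intro a k hf ha hk hsp hmid
    rw [fpScanA, dif_pos (by omega : a < cs.length)]
    by_cases hak : a = k
    · subst hak; rw [if_pos hsp]
    · rw [if_neg (hmid a le_rfl (by omega) (by omega))]
      exact ih (a + 1) k (by omega) (by omega) hk hsp
        (fun j hj hjk hlt => hmid j (by omega) hjk hlt)

-- when no space lies at or after total+50, every fuel gives the final line
theorem fpChunksB_exit (cs pre : List Char) (total : Nat)
    (h : ∀ j, total + 50 ≤ j → (hj : j < cs.length) → cs[j] ≠ ' ') :
    ∀ fuel, fpChunksB cs pre fuel total = pre ++ cs.drop total ++ "<br>".toList := by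
  intro fuel
  cases fuel with
  | zero => rfl
  | succ fuel =>
    rw [fpChunksB, fpScanA_eq_none cs cs.length (total + 50) h]

-- A's loop accumulates exactly the chunk list (same fuel on both sides)
theorem fpLoopA_eq_chunks (cs pre : List Char) :
    ∀ (fuel total : Nat) (string : List Char),
    fpLoopA cs pre fuel total string = string ++ fpChunksB cs pre fuel total := by
  intro fuel
  induction fuel with
  | zero => intro total string; rw [fpLoopA, fpChunksB]; simp
  | succ fuel ih =>
    intro total string
    rw [fpLoopA, fpChunksB]
    by_cases hlt : total + 50 < cs.length
    · rw [if_pos hlt]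
      cases hscan : fpScanA cs cs.length (total + 50) with
      | none => simp
      | some p => simp [ih]
    · rw [if_neg hlt,
        fpScanA_eq_none cs cs.length (total + 50) (fun j hj hlt' => by omega)]
      simp

-- B's fold, started at offset k with line start 'start' and accumulated parts,
-- produces parts ++ the chunk list from 'start', provided no accepted space was
-- skipped (no space lies in [start+50, k)) and the fuel allows every remaining cut.
theorem fpFoldB (cs pre : List Char) :
    ∀ (n k start : Nat) (parts : List (List Char)) (fuel : Nat), cs.length - k = n →
    (∀ j, start + 50 ≤ j → j < k → (hj : j < cs.length) → cs[j] ≠ ' ') →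
    cs.length ≤ start + 50 * fuel + 50 →
    ((PySem.List.enumerate (cs.drop k) (k : Int)).foldl
        (fun (acc : List (List Char) × Int) ic =>
          if ic.2 = ' ' ∧ acc.2 + 50 ≤ ic.1 then
            (acc.1 ++ [pre ++ (cs.drop acc.2.toNat).take (ic.1 - acc.2).toNat ++ "<br>".toList], ic.1)
          else acc)
        (parts, (start : Int))).1.flatten
      ++ (pre ++ cs.drop ((PySem.List.enumerate (cs.drop k) (k : Int)).foldl
        (fun (acc : List (List Char) × Int) ic =>
          if ic.2 = ' ' ∧ acc.2 + 50 ≤ ic.1 then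
            (acc.1 ++ [pre ++ (cs.drop acc.2.toNat).take (ic.1 - acc.2).toNat ++ "<br>".toList], ic.1)
          else acc)
        (parts, (start : Int))).2.toNat ++ "<br>".toList)
      = parts.flatten ++ fpChunksB cs pre fuel start := by
  intro n
  induction n with
  | zero =>
    intro k start parts fuel hn hinv _
    have hk : cs.length ≤ k := by omega
    simp only [List.drop_eq_nil_of_le hk, PySem.List.enumerate_nil, List.foldl_nil,
      Int.toNat_natCast]
    rw [fpChunksB_exit cs pre start (fun j hj hlt => hinv j hj (by omega) hlt) fuel]
  | succ n ih =>
    intro k start parts fuel hn hinv hfuel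
    have hk : k < cs.length := by omega
    rw [List.drop_eq_getElem_cons hk, PySem.List.enumerate_cons, List.foldl_cons]
    by_cases hc : cs[k] = ' ' ∧ start + 50 ≤ k
    · have hc' : cs[k] = ' ' ∧ ((start : Nat) : Int) + 50 ≤ ((k : Nat) : Int) :=
        ⟨hc.1, by exact_mod_cast hc.2⟩
      rw [if_pos hc']
      obtain ⟨f, rfl⟩ : ∃ f, fuel = f + 1 := by
        cases fuel with
        | zero => omega
        | succ f => exact ⟨f, rfl⟩
      have hsome : fpScanA cs cs.length (start + 50) = some k :=
        fpScanA_eq_some cs cs.length (start + 50) k (by omega) hc.2 hk hc.1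
          (fun j hj hjk hlt => hinv j hj hjk hlt)
      have htn : ((start : Nat) : Int).toNat = start := Int.toNat_natCast start
      have htd : (((k : Nat) : Int) - ((start : Nat) : Int)).toNat = k - start := by omega
      have hcast : ((k : Nat) : Int) + 1 = (((k + 1 : Nat)) : Int) := by push_cast; ring
      rw [htn, htd, hcast]
      rw [ih (k + 1) k _ f (by omega) (fun j hj hjk hlt => by omega) (by omega)]
      rw [fpChunksB, hsome]
      simp
    · have hc' : ¬ (cs[k] = ' ' ∧ ((start : Nat) : Int) + 50 ≤ ((k : Nat) : Int)) := by
        intro ⟨h1, h2⟩; exact hc ⟨h1, by exact_mod_cast h2⟩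
      rw [if_neg hc']
      have hcast : ((k : Nat) : Int) + 1 = (((k + 1 : Nat)) : Int) := by push_cast; ring
      rw [hcast]
      refine ih (k + 1) start parts fuel (by omega) ?_ hfuel
      intro j hj hjk hlt
      by_cases hjkk : j = k
      · subst hjkk; intro hs; exact hc ⟨hs, hj⟩
      · exact hinv j hj (by omega) hlt

-- ===== VERDICT (by name: the statement is the Claim_ definition above) =====
theorem formatprint_spec : Claim_equal_formatprint := by
  intro item depth _
  simp only [Spec_formatprint, formatprint, formatprint_alt]
  rw [fpLoopA_eq_chunks]
  have h := fpFoldB item.toList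
    (PySem.List.pyRepeat (PySem.List.pyRepeat "&nbsp".toList 4) depth)
    item.toList.length 0 0 [] item.toList.length (by omega)
    (fun j hj hjk hlt => by omega) (by omega)
  simp only [List.drop_zero, Nat.cast_zero, List.flatten_nil, List.nil_append] at h
  rw [List.nil_append, h]
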